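-- pv_equiv track=rewrite | github.com/NGKsSystems/NGKsDevFabEco | NGKsDevFabric/src/ngksdevfabric/ngk_fabric/runwrap.py | _resolve_sln_config
-- ===== SOURCE A (Python) =====
-- from typing import Any
--
-- def _mode_to_request(mode: str) -> tuple[str, str, str]:
--     lower = mode.lower()
--     conf = "Release" if lower.startswith("release") else "Debug"
--     if "anycpu" in lower or "any_cpu" in lower:
--         plat = "Any CPU"
--     elif "x64" in lower:
--         plat = "x64"
--     else:
--         plat = "x64"
--     return lower, conf, plat
--
-- def _resolve_sln_config(configs: list[tuple[str, str]], mode: str) -> tuple[str | None, str | None, dict[str, Any]]: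
--     mode_key, requested_conf, requested_plat = _mode_to_request(mode)
--     requested = f"{requested_conf}|{requested_plat}"
--     if not configs:
--         return None, None, {
--             "requested": requested,
--             "resolved": None,
--             "reason": "no SolutionConfigurationPlatforms found",
--         }
--
--     exact = next(
--         (item for item in configs if item[0].lower() == requested_conf.lower() and item[1].lower() == requested_plat.lower()),
--         None,
--     )
--     if exact:
--         return exact[0], exact[1], {"requested": requested, "resolved": f"{exact[0]}|{exact[1]}", "reason": "exact match"}
--
--     mode_match = next((item for item in configs if item[0].lower() == requested_conf.lower()), None)
--     if mode_match:
--         return mode_match[0], mode_match[1], {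
--             "requested": requested,
--             "resolved": f"{mode_match[0]}|{mode_match[1]}",
--             "reason": "requested platform not found in SolutionConfigurationPlatforms",
--         }
--
--     first = configs[0]
--     return first[0], first[1], {
--         "requested": requested,
--         "resolved": f"{first[0]}|{first[1]}",
--         "reason": f"requested mode '{mode_key}' not found; selected first available tuple",
--     }
-- ===== SOURCE B (Python) =====
-- from typing import Any
--
-- def _mode_to_request(mode: str) -> tuple[str, str, str]:
--     lower = mode.lower()
--     conf = "Release" if lower.startswith("release") else "Debug"
--     if "anycpu" in lower or "any_cpu" in lower:
--         plat = "Any CPU"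
--     elif "x64" in lower:
--         plat = "x64"
--     else:
--         plat = "x64"
--     return lower, conf, plat
--
-- def _resolve_sln_config(configs: list[tuple[str, str]], mode: str) -> tuple[str | None, str | None, dict[str, Any]]:
--     mode_key, requested_conf, requested_plat = _mode_to_request(mode)
--     requested = f"{requested_conf}|{requested_plat}"
--     if not configs:
--         return None, None, {
--             "requested": requested,
--             "resolved": None,
--             "reason": "no SolutionConfigurationPlatforms found",
--         }
--     conf_key = requested_conf.lower()
--     plat_key = requested_plat.lower()
--     conf_only = None
--     for c, p in configs:
--         if c.lower() == conf_key:
--             if p.lower() == plat_key: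
--                 return c, p, {"requested": requested, "resolved": f"{c}|{p}", "reason": "exact match"}
--             if conf_only is None:
--                 conf_only = (c, p)
--     if conf_only is not None:
--         c, p = conf_only
--         return c, p, {
--             "requested": requested,
--             "resolved": f"{c}|{p}",
--             "reason": "requested platform not found in SolutionConfigurationPlatforms",
--         }
--     c, p = configs[0]
--     return c, p, {
--         "requested": requested,
--         "resolved": f"{c}|{p}",
--         "reason": f"requested mode '{mode_key}' not found; selected first available tuple",
--     }
-- ===== Notes on version B (the rewrite author's own statement) =====
-- stated objective: simpler
-- what changed: The three separate next()/indexing scans over configs are merged into one for-loop that returns immediately on an exact match and remembers the first config-only match for the fallback, so the list is traversed at most once.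
import Mathlib
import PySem

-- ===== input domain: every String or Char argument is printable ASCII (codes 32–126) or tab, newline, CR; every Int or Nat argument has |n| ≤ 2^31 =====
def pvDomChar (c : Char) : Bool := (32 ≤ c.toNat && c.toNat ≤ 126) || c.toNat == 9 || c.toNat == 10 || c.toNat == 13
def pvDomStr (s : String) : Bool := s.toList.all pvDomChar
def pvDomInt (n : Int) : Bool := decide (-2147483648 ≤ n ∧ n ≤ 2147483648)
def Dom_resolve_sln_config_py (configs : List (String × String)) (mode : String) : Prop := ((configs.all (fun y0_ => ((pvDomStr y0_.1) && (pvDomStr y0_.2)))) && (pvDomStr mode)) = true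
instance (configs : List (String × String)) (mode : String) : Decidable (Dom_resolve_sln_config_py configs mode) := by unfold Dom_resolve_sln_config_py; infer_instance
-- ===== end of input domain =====

-- B merges A's three separate next()/indexing scans into one loop (return on exact match,
-- remember the first config-only match) — objective: simpler, one pass instead of up to three.

-- shared helper: port of _mode_to_request (used by both Pythons)
def modeToRequest (mode : String) : String × String × String :=
  let lower := PySem.Str.lower mode
  let conf := if PySem.Str.startswith lower "release" then "Release" else "Debug"
  let plat :=
    if PySem.Str.isIn "anycpu" lower || PySem.Str.isIn "any_cpu" lower then "Any CPU"
    else if PySem.Str.isIn "x64" lower then "x64"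
    else "x64"
  (lower, conf, plat)

-- ===== PORT A =====
def resolve_sln_config_py (configs : List (String × String)) (mode : String) : Option String × Option String × (List (String × Option String)) :=
  let r := modeToRequest mode
  let mode_key := r.1
  let requested_conf := r.2.1
  let requested_plat := r.2.2
  let requested := requested_conf ++ "|" ++ requested_plat
  match configs with
  | [] => (none, none,
      [("requested", some requested), ("resolved", none),
       ("reason", some "no SolutionConfigurationPlatforms found")])
  | first :: _ =>
    match configs.find? (fun item =>
        PySem.Str.lower item.1 == PySem.Str.lower requested_conf &&
        PySem.Str.lower item.2 == PySem.Str.lower requested_plat) with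
    | some exact => (some exact.1, some exact.2,
        [("requested", some requested), ("resolved", some (exact.1 ++ "|" ++ exact.2)),
         ("reason", some "exact match")])
    | none =>
      match configs.find? (fun item =>
          PySem.Str.lower item.1 == PySem.Str.lower requested_conf) with
      | some m => (some m.1, some m.2,
          [("requested", some requested), ("resolved", some (m.1 ++ "|" ++ m.2)),
           ("reason", some "requested platform not found in SolutionConfigurationPlatforms")])
      | none => (some first.1, some first.2,
          [("requested", some requested), ("resolved", some (first.1 ++ "|" ++ first.2)),
           ("reason", some ("requested mode '" ++ mode_key ++ "' not found; selected first available tuple"))])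

-- ===== PORT B =====
-- the single for-loop of Source B: returns on exact match, remembers first config-only match;
-- `first` is configs[0] (the loop only runs on nonempty configs), `acc` is conf_only
def bLoop (requested mode_key conf_key plat_key : String) (first : String × String) :
    List (String × String) → Option (String × String) → Option String × Option String × (List (String × Option String))
  | [], acc =>
    match acc with
    | some m => (some m.1, some m.2,
        [("requested", some requested), ("resolved", some (m.1 ++ "|" ++ m.2)),
         ("reason", some "requested platform not found in SolutionConfigurationPlatforms")])
    | none => (some first.1, some first.2,
        [("requested", some requested), ("resolved", some (first.1 ++ "|" ++ first.2)),
         ("reason", some ("requested mode '" ++ mode_key ++ "' not found; selected first available tuple"))])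
  | (c, p) :: rest, acc =>
    if PySem.Str.lower c == conf_key then
      if PySem.Str.lower p == plat_key then
        (some c, some p,
          [("requested", some requested), ("resolved", some (c ++ "|" ++ p)),
           ("reason", some "exact match")])
      else
        bLoop requested mode_key conf_key plat_key first rest (acc.orElse (fun _ => some (c, p)))
    else
      bLoop requested mode_key conf_key plat_key first rest acc

def resolve_sln_config_py_alt (configs : List (String × String)) (mode : String) : Option String × Option String × (List (String × Option String)) :=
  let r := modeToRequest mode
  let mode_key := r.1
  let requested_conf := r.2.1
  let requested_plat := r.2.2
  let requested := requested_conf ++ "|" ++ requested_plat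
  match configs with
  | [] => (none, none,
      [("requested", some requested), ("resolved", none),
       ("reason", some "no SolutionConfigurationPlatforms found")])
  | first :: _ =>
    bLoop requested mode_key (PySem.Str.lower requested_conf) (PySem.Str.lower requested_plat)
      first configs none

-- ===== PRECONDITION & SPEC =====
def Spec_resolve_sln_config_py (configs : List (String × String)) (mode : String) (out : Option String × Option String × (List (String × Option String))) : Prop := out = resolve_sln_config_py_alt configs mode
instance (configs : List (String × String)) (mode : String) (out : Option String × Option String × (List (String × Option String))) : Decidable (Spec_resolve_sln_config_py configs mode out) := by unfold Spec_resolve_sln_config_py; infer_instance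

-- ===== CLAIM (what is proved, stated in full; the proofs are below) =====
def Claim_equal_resolve_sln_config_py : Prop := ∀ (configs : List (String × String)) (mode : String), Dom_resolve_sln_config_py configs mode → Spec_resolve_sln_config_py configs mode (resolve_sln_config_py configs mode)

-- ===== LEMMAS AND PROOFS =====

-- the loop computes: first exact match if any, else the remembered/first config-only match, else `first`
lemma bLoop_eq (requested mode_key ck pk : String) (first : String × String)
    (l : List (String × String)) (acc : Option (String × String)) :
    bLoop requested mode_key ck pk first l acc =
      match l.find? (fun it => PySem.Str.lower it.1 == ck && PySem.Str.lower it.2 == pk) with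
      | some e => (some e.1, some e.2,
          [("requested", some requested), ("resolved", some (e.1 ++ "|" ++ e.2)),
           ("reason", some "exact match")])
      | none =>
        match acc.or (l.find? (fun it => PySem.Str.lower it.1 == ck)) with
        | some m => (some m.1, some m.2,
            [("requested", some requested), ("resolved", some (m.1 ++ "|" ++ m.2)),
             ("reason", some "requested platform not found in SolutionConfigurationPlatforms")])
        | none => (some first.1, some first.2,
            [("requested", some requested), ("resolved", some (first.1 ++ "|" ++ first.2)),
             ("reason", some ("requested mode '" ++ mode_key ++ "' not found; selected first available tuple"))]) := by
  induction l generalizing acc with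
  | nil => cases acc <;> simp [bLoop]
  | cons hd tl ih =>
    obtain ⟨c, p⟩ := hd
    by_cases hc : PySem.Str.lower c == ck
    · by_cases hp : PySem.Str.lower p == pk
      · simp [bLoop, hc, hp, List.find?]
      · cases acc <;>
          simp [bLoop, hc, hp, List.find?, ih, Option.orElse, Option.or]
    · simp [bLoop, hc, List.find?]
      exact ih acc

theorem resolve_sln_config_py_spec_aux (configs : List (String × String)) (mode : String) :
    resolve_sln_config_py configs mode = resolve_sln_config_py_alt configs mode := by
  unfold resolve_sln_config_py resolve_sln_config_py_alt
  cases configs with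
  | nil => rfl
  | cons first rest =>
    simp only [bLoop_eq, Option.none_or]

-- ===== VERDICT (by name: the statement is the Claim_ definition above) =====
theorem resolve_sln_config_py_spec : Claim_equal_resolve_sln_config_py := by
  intro configs mode _
  exact resolve_sln_config_py_spec_aux configs mode
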